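-- pv_equiv track=rewrite | github.com/threealgos/rotor-cuda-CROW | Rotor-Colab/Linux/python2.py | analisar_chave
-- ===== SOURCE A (Python) =====
-- def analisar_chave(chave):
--     credito = 0
--     for bit in chave:
--         if bit == '1':
--             credito += 1
--         else:
--             credito -= 1
--     return credito
-- ===== SOURCE B (Python) =====
-- def analisar_chave(chave):
--     return 2 * chave.count('1') - len(chave)
-- ===== Notes on version B (the rewrite author's own statement) =====
-- stated objective: faster
-- what changed: Replaces the per-character Python loop and branch with the closed form 2*chave.count('1') - len(chave): each matching bit contributes +1 and every other character -1, so credit = 2*ones - length.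
import Mathlib
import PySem

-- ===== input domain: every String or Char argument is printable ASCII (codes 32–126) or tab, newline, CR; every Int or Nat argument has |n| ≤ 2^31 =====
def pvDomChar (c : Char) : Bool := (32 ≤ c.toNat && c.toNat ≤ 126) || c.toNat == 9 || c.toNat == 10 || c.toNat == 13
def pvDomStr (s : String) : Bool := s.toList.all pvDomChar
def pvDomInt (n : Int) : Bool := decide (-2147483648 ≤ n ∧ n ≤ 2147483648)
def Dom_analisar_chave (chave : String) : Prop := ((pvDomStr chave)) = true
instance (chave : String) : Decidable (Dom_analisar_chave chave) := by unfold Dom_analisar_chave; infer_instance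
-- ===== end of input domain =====

-- B replaces A's per-character loop and branch with the closed form 2*count('1') - len (idiomatic).

-- ===== PORT A =====
-- for bit in chave: credito += 1 if bit == '1' else -1
def analisar_chave (chave : String) : Int :=
  chave.toList.foldl (fun credito bit => if bit = '1' then credito + 1 else credito - 1) 0

-- ===== PORT B =====
-- return 2 * chave.count('1') - len(chave)
def analisar_chave_alt (chave : String) : Int :=
  2 * (PySem.Str.count chave "1" : Int) - PySem.Str.len chave

-- ===== PRECONDITION & SPEC =====
def Spec_analisar_chave (chave : String) (out : Int) : Prop := out = analisar_chave_alt chave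
instance (chave : String) (out : Int) : Decidable (Spec_analisar_chave chave out) := by unfold Spec_analisar_chave; infer_instance

-- ===== CLAIM (what is proved, stated in full; the proofs are below) =====
def Claim_equal_analisar_chave : Prop := ∀ (chave : String), Dom_analisar_chave chave → Spec_analisar_chave chave (analisar_chave chave)

-- ===== LEMMAS AND PROOFS =====

-- Python's str.count with a single-character needle is List.count on the code points.
theorem count_go_single (s : List Char) : ∀ (fuel acc : Nat), s.length ≤ fuel →
    PySem.Chars.count.go ['1'] fuel s acc = acc + s.count '1' := by
  induction s with
  | nil => intro fuel acc h; cases fuel <;> simp [PySem.Chars.count.go]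
  | cons c t ih =>
    intro fuel acc h
    cases fuel with
    | zero => simp at h
    | succ f =>
      rw [PySem.Chars.count.go]
      by_cases hc : c = '1'
      · subst hc
        simp [List.isPrefixOf, ih f (acc + 1) (by simpa using h)]
        omega
      · have hp : ¬ (List.isPrefixOf ['1'] (c :: t) = true) := by
          simp [List.isPrefixOf]; intro hb; exact hc (by simpa using hb.symm)
        simp [hp, ih f acc (by simpa using h), hc]

theorem chars_count_single (s : List Char) : PySem.Chars.count s ['1'] = s.count '1' := by
  simp [PySem.Chars.count, count_go_single s s.length 0 le_rfl]

-- A's fold maintains credito = ones so far − others so far = 2·ones − length so far.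
theorem fold_eq (s : List Char) : ∀ (a : Int),
    s.foldl (fun credito bit => if bit = '1' then credito + 1 else credito - 1) a
      = a + 2 * (s.count '1' : Int) - s.length := by
  induction s with
  | nil => intro a; simp
  | cons c t ih =>
    intro a
    by_cases hc : c = '1' <;> simp [hc, ih] <;> ring

-- ===== VERDICT (by name: the statement is the Claim_ definition above) =====
theorem analisar_chave_spec : Claim_equal_analisar_chave := by
  intro chave _
  unfold Spec_analisar_chave analisar_chave analisar_chave_alt
  rw [fold_eq]
  simp [PySem.Str.count_eq, PySem.Str.len_eq, chars_count_single]
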